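-- pv_equiv track=rewrite | github.com/cjmcv/tilelang | demo/microkernels/example_gemm.py | replace_line
-- ===== SOURCE A (Python) =====
-- def replace_line(text: str, src_target: str, skip_count: int, dst_target: str) -> str:
--     lines = text.splitlines(True)
--     processed_lines = []
--     target_count = 0
--
--     for line in lines:
--         if src_target in line:
--             target_count += 1
--             if target_count == skip_count:
--                 continue
--             processed_lines.append(dst_target)
--         else:
--             processed_lines.append(line)
--     return "".join(processed_lines)
-- ===== SOURCE B (Python) =====
-- def replace_line(text: str, src_target: str, skip_count: int, dst_target: str) -> str:
--     lines = text.splitlines(True)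
--     matches = [i for i, line in enumerate(lines) if src_target in line]
--     skip_index = matches[skip_count - 1] if 0 < skip_count <= len(matches) else None
--     out = []
--     for i, line in enumerate(lines):
--         if i == skip_index:
--             continue
--         out.append(dst_target if src_target in line else line)
--     return "".join(out)
-- ===== Notes on version B (the rewrite author's own statement) =====
-- stated objective: alternative
-- what changed: Replaces A's single stateful pass (running match counter deciding the skip on the fly) by first computing the list of matching line indices, selecting the skipped index (or None) once, and then emitting lines by index comparison.
import Mathlib
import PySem

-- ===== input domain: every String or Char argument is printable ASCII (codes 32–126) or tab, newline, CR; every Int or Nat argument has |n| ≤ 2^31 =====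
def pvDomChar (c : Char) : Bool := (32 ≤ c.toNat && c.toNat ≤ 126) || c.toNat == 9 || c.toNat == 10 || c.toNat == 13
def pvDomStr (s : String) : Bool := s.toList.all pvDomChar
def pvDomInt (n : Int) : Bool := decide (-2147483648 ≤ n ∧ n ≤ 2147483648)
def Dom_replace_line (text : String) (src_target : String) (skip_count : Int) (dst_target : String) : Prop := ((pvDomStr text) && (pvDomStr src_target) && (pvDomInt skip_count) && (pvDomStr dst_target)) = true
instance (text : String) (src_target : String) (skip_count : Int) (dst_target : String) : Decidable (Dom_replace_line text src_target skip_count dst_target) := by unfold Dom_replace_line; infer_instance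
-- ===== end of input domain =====

-- B re-implements A's single stateful pass (running match counter deciding the skip on the fly) as:
-- collect the matching line indices, pick the skipped index once, then emit lines by index comparison.
-- text.splitlines(True) (keepends) is not in PySem; ported by hand below, exact on the Dom alphabet
-- (the only line breaks there are '\n', '\r', '\r\n').
def splitlinesKeep (cur : List Char) : List Char → List (List Char)
  | [] => if cur = [] then [] else [cur.reverse]
  | '\r' :: '\n' :: rest => (cur.reverse ++ ['\r', '\n']) :: splitlinesKeep [] rest
  | '\r' :: rest => (cur.reverse ++ ['\r']) :: splitlinesKeep [] rest
  | '\n' :: rest => (cur.reverse ++ ['\n']) :: splitlinesKeep [] rest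
  | c :: rest => splitlinesKeep (c :: cur) rest

-- ===== PORT A =====
def replace_line (text : String) (src_target : String) (skip_count : Int) (dst_target : String) : String :=
  let lines := splitlinesKeep [] text.toList
  let st := lines.foldl
    (fun (st : List (List Char) × Int) line =>
      if PySem.Chars.isIn src_target.toList line then
        let tc := st.2 + 1
        if tc = skip_count then (st.1, tc) else (st.1 ++ [dst_target.toList], tc)
      else (st.1 ++ [line], st.2)) ([], 0)
  String.mk (PySem.Chars.join [] st.1)

-- ===== PORT B =====
def replace_line_alt (text : String) (src_target : String) (skip_count : Int) (dst_target : String) : String :=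
  let lines := splitlinesKeep [] text.toList
  let matchIdx : List Int := (List.zipIdx lines).filterMap
      (fun p => if PySem.Chars.isIn src_target.toList p.1 then some ((p.2 : Int)) else none)
  let skip_index : Option Int :=
    if 0 < skip_count ∧ skip_count ≤ (matchIdx.length : Int)
    then PySem.List.pyGet? matchIdx (skip_count - 1) else none
  let out := (List.zipIdx lines).foldl
      (fun acc p => if some ((p.2 : Int)) = skip_index then acc
        else acc ++ [if PySem.Chars.isIn src_target.toList p.1 then dst_target.toList else p.1]) []
  String.mk (PySem.Chars.join [] out)

-- ===== PRECONDITION & SPEC =====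
def Spec_replace_line (text : String) (src_target : String) (skip_count : Int) (dst_target : String) (out : String) : Prop := out = replace_line_alt text src_target skip_count dst_target
instance (text : String) (src_target : String) (skip_count : Int) (dst_target : String) (out : String) : Decidable (Spec_replace_line text src_target skip_count dst_target out) := by unfold Spec_replace_line; infer_instance

-- ===== CLAIM (what is proved, stated in full; the proofs are below) =====
def Claim_equal_replace_line : Prop := ∀ (text : String) (src_target : String) (skip_count : Int) (dst_target : String), Dom_replace_line text src_target skip_count dst_target → Spec_replace_line text src_target skip_count dst_target (replace_line text src_target skip_count dst_target)

-- ===== LEMMAS AND PROOFS =====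

-- A's loop, as structural recursion threading the match counter.
def goA (src dst : List Char) (skip : Int) : List (List Char) → Int → List (List Char)
  | [], _ => []
  | l :: rest, c =>
    if PySem.Chars.isIn src l then
      if c + 1 = skip then goA src dst skip rest (c + 1)
      else dst :: goA src dst skip rest (c + 1)
    else l :: goA src dst skip rest c

-- B's emit loop, with the skip index made relative (decremented at each step).
def emitB (src dst : List Char) : List (List Char) → Option Int → List (List Char)
  | [], _ => []
  | l :: rest, r =>
    (if r = some 0 then [] else [if PySem.Chars.isIn src l then dst else l])
      ++ emitB src dst rest (r.map (· - 1))

-- relative indices of the matching lines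
def matchesOf (src : List Char) : List (List Char) → List Int
  | [] => []
  | l :: rest => (if PySem.Chars.isIn src l then [(0 : Int)] else [])
      ++ (matchesOf src rest).map (· + 1)

def siOf (src : List Char) (r : Int) (lines : List (List Char)) : Option Int :=
  if 0 < r ∧ r ≤ ((matchesOf src lines).length : Int)
  then PySem.List.pyGet? (matchesOf src lines) (r - 1) else none

theorem pyGet?_nonneg_idx {α : Type} (xs : List α) (i : Int) (h : 0 ≤ i) :
    PySem.List.pyGet? xs i = xs[i.toNat]? := by
  have hx := PySem.List.pyGet?_natCast xs i.toNat
  rw [show ((i.toNat : Nat) : Int) = i from by omega] at hx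
  exact hx

theorem foldlA_eq (src dst : List Char) (skip : Int) :
    ∀ (lines : List (List Char)) (acc : List (List Char)) (c : Int),
    (lines.foldl (fun (st : List (List Char) × Int) line =>
      if PySem.Chars.isIn src line then
        let tc := st.2 + 1
        if tc = skip then (st.1, tc) else (st.1 ++ [dst], tc)
      else (st.1 ++ [line], st.2)) (acc, c)).1 = acc ++ goA src dst skip lines c := by
  intro lines
  induction lines with
  | nil => intro acc c; simp [goA]
  | cons l rest ih =>
    intro acc c
    by_cases h : PySem.Chars.isIn src l = true
    · by_cases h2 : c + 1 = skip <;> simp [List.foldl_cons, goA, h, h2, ih]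
    · simp [List.foldl_cons, goA, h, ih]

theorem matches_zipIdx (src : List Char) :
    ∀ (lines : List (List Char)) (n : Nat),
    (List.zipIdx lines n).filterMap
      (fun p => if PySem.Chars.isIn src p.1 then some ((p.2 : Int)) else none)
      = (matchesOf src lines).map (· + (n : Int)) := by
  intro lines
  induction lines with
  | nil => intro n; simp [matchesOf]
  | cons l rest ih =>
    intro n
    simp only [List.zipIdx_cons, List.filterMap_cons, matchesOf]
    by_cases h : PySem.Chars.isIn src l = true <;>
      simp [h, ih (n + 1)] <;> intros <;> push_cast <;> ring

theorem foldlB_eq (src dst : List Char) (si : Option Int) :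
    ∀ (lines : List (List Char)) (acc : List (List Char)) (n : Nat),
    ((List.zipIdx lines n).foldl
      (fun acc p => if some ((p.2 : Int)) = si then acc
        else acc ++ [if PySem.Chars.isIn src p.1 then dst else p.1]) acc)
      = acc ++ emitB src dst lines (si.map (fun j => j - (n : Int))) := by
  intro lines
  induction lines with
  | nil => intro acc n; simp [emitB]
  | cons l rest ih =>
    intro acc n
    rw [List.zipIdx_cons, List.foldl_cons]
    rcases si with _ | j
    · rw [if_neg (by simp : ¬ (some ((n : Int)) = (none : Option Int))), ih]
      simp only [Option.map_none, emitB]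
      rw [if_neg (by simp : ¬ ((none : Option Int) = some 0))]
      simp
    · simp only [Option.map_some]
      by_cases h : ((n : Int)) = j
      · subst h
        rw [if_pos rfl, ih]
        simp only [Option.map_some, emitB]
        rw [if_pos (by norm_num),
            show ((n : Int) - ((n : Int)) - 1) = (n : Int) - (((n + 1 : Nat)) : Int) from by
              push_cast; ring]
        simp
      · rw [if_neg (by simpa using h), ih]
        simp only [Option.map_some, emitB]
        rw [if_neg (by simp; omega : ¬ (some (j - (n : Int)) = some (0 : Int))),
            show (j - ((n : Int)) - 1) = j - (((n + 1 : Nat)) : Int) from by push_cast; ring]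
        simp

theorem emitB_neg (src dst : List Char) :
    ∀ (lines : List (List Char)) (j : Int), j < 0 →
    emitB src dst lines (some j) = emitB src dst lines none := by
  intro lines
  induction lines with
  | nil => intro j hj; simp [emitB]
  | cons l rest ih =>
    intro j hj
    simp only [emitB, Option.map_some, Option.map_none]
    rw [ih (j - 1) (by omega)]
    have hne : ¬ ((some j : Option Int) = some 0) := by simp; omega
    simp [hne]

theorem matchesOf_nonneg (src : List Char) :
    ∀ (lines : List (List Char)), ∀ x ∈ matchesOf src lines, 0 ≤ x := by
  intro lines
  induction lines with
  | nil => simp [matchesOf]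
  | cons l rest ih =>
    intro x hx
    simp only [matchesOf, List.mem_append, List.mem_map] at hx
    rcases hx with hx | ⟨y, hy, rfl⟩
    · split at hx <;> simp_all
    · have := ih y hy; omega

theorem siOf_nonneg (src : List Char) (r : Int) (lines : List (List Char)) (j : Int)
    (h : siOf src r lines = some j) : 0 ≤ j := by
  unfold siOf at h
  split at h
  · next hc =>
    rw [pyGet?_nonneg_idx _ _ (by omega)] at h
    exact matchesOf_nonneg src lines j (List.mem_of_getElem? h)
  · cases h

theorem siOf_zero (src : List Char) (lines : List (List Char)) :
    siOf src 0 lines = none := by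
  simp [siOf]

theorem siOf_cons_match_one (src l : List Char) (rest : List (List Char))
    (hl : PySem.Chars.isIn src l = true) :
    siOf src 1 (l :: rest) = some 0 := by
  have hm : matchesOf src (l :: rest) = (0 : Int) :: (matchesOf src rest).map (· + 1) := by
    simp [matchesOf, hl]
  unfold siOf
  rw [hm, pyGet?_nonneg_idx _ _ (by omega)]
  simp

theorem siOf_cons_match_ne (src l : List Char) (rest : List (List Char))
    (hl : PySem.Chars.isIn src l = true) (r : Int) (hr : r ≠ 1) :
    siOf src r (l :: rest) = (siOf src (r - 1) rest).map (· + 1) := by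
  have hm : matchesOf src (l :: rest) = (0 : Int) :: (matchesOf src rest).map (· + 1) := by
    simp [matchesOf, hl]
  unfold siOf
  rw [hm]
  by_cases hc : 0 < r ∧ r ≤ (((0 : Int) :: (matchesOf src rest).map (· + 1)).length : Int)
  · have hc' : 0 < r - 1 ∧ r - 1 ≤ ((matchesOf src rest).length : Int) := by
      simp at hc; constructor <;> omega
    rw [if_pos hc, if_pos hc']
    rw [pyGet?_nonneg_idx _ _ (by omega), pyGet?_nonneg_idx _ _ (by omega)]
    have hidx : (r - 1).toNat = ((r - 1 - 1).toNat) + 1 := by omega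
    rw [hidx]
    simp [List.getElem?_cons_succ]
  · have hc' : ¬ (0 < r - 1 ∧ r - 1 ≤ ((matchesOf src rest).length : Int)) := by
      simp at hc ⊢; intro h1; have := hc (by omega); omega
    rw [if_neg hc, if_neg hc']
    simp

theorem siOf_cons_nomatch (src l : List Char) (rest : List (List Char))
    (hl : ¬ PySem.Chars.isIn src l = true) (r : Int) :
    siOf src r (l :: rest) = (siOf src r rest).map (· + 1) := by
  have hm : matchesOf src (l :: rest) = (matchesOf src rest).map (· + 1) := by
    simp [matchesOf, hl]
  unfold siOf
  rw [hm]
  by_cases hc : 0 < r ∧ r ≤ (((matchesOf src rest).map (· + 1)).length : Int)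
  · have hc' : 0 < r ∧ r ≤ ((matchesOf src rest).length : Int) := by
      simpa using hc
    rw [if_pos hc, if_pos hc']
    rw [pyGet?_nonneg_idx _ _ (by omega), pyGet?_nonneg_idx _ _ (by omega)]
    simp
  · have hc' : ¬ (0 < r ∧ r ≤ ((matchesOf src rest).length : Int)) := by
      simpa using hc
    rw [if_neg hc, if_neg hc']
    simp

theorem map_sub_one_map_add_one (s : Option Int) :
    ((s.map (· + 1)).map (· - 1)) = s := by
  cases s <;> simp

theorem siOf_map_ne_zero (src : List Char) (r : Int) (rest : List (List Char)) :
    ¬ ((siOf src r rest).map (· + 1) = some 0) := by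
  cases hmem : siOf src r rest with
  | none => simp
  | some j => have := siOf_nonneg src r rest j hmem; simp; omega

theorem main_lemma (src dst : List Char) (skip : Int) :
    ∀ (lines : List (List Char)) (c : Int),
    goA src dst skip lines c = emitB src dst lines (siOf src (skip - c) lines) := by
  intro lines
  induction lines with
  | nil => intro c; simp [goA, emitB]
  | cons l rest ih =>
    intro c
    by_cases hl : PySem.Chars.isIn src l = true
    · by_cases hs : skip - c = 1
      · have h1 : c + 1 = skip := by omega
        have hsi : siOf src (skip - c) (l :: rest) = some 0 := by
          rw [hs]; exact siOf_cons_match_one src l rest hl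
        rw [hsi]
        simp only [goA, emitB, hl, if_true, Option.map_some]
        rw [if_pos h1, ih (c + 1),
            show skip - (c + 1) = 0 from by omega, siOf_zero,
            emitB_neg src dst rest (0 - 1) (by omega)]
        simp
      · have hsi : siOf src (skip - c) (l :: rest)
            = (siOf src (skip - c - 1) rest).map (· + 1) :=
          siOf_cons_match_ne src l rest hl (skip - c) hs
        rw [hsi]
        simp only [goA, emitB, hl, if_true]
        rw [if_neg (show ¬ (c + 1 = skip) by omega),
            if_neg (siOf_map_ne_zero src (skip - c - 1) rest),
            map_sub_one_map_add_one, ih (c + 1),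
            show skip - (c + 1) = skip - c - 1 by ring]
        simp [hl]
    · have hsi : siOf src (skip - c) (l :: rest)
          = (siOf src (skip - c) rest).map (· + 1) :=
        siOf_cons_nomatch src l rest hl (skip - c)
      rw [hsi]
      simp only [goA, emitB, hl, if_false, Bool.false_eq_true]
      rw [if_neg (siOf_map_ne_zero src (skip - c) rest),
          map_sub_one_map_add_one, ih c]
      simp [hl]

theorem replace_line_eq_alt (text src_target : String) (skip_count : Int) (dst_target : String) :
    replace_line text src_target skip_count dst_target
      = replace_line_alt text src_target skip_count dst_target := by
  unfold replace_line replace_line_alt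
  simp only
  rw [foldlA_eq, foldlB_eq, matches_zipIdx]
  simp only [Nat.cast_zero, add_zero, sub_zero, List.nil_append]
  have hmain := main_lemma src_target.toList dst_target.toList skip_count
    (splitlinesKeep [] text.toList) 0
  rw [sub_zero] at hmain
  unfold siOf at hmain
  simp only [List.map_id', Option.map_id', id]
  rw [hmain]

-- ===== VERDICT (by name: the statement is the Claim_ definition above) =====
theorem replace_line_spec : Claim_equal_replace_line := by
  intro text src_target skip_count dst_target _
  unfold Spec_replace_line
  exact replace_line_eq_alt text src_target skip_count dst_target
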